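-- pv_equiv track=rewrite | github.com/MaxwellCalkin/sentinel-ai | sentinel/context_guard.py | _redact_leaked_content
-- ===== SOURCE A (Python) =====
-- def _redact_leaked_content(content: str, system_prompt: str) -> str:
--     """Replace the longest leaked substring with [REDACTED]."""
--     content_lower = content.lower()
--     prompt_lower = system_prompt.lower()
--
--     longest_start = -1
--     longest_length = 0
--
--     for start in range(len(prompt_lower)):
--         for end in range(len(prompt_lower), start + 20, -1):
--             substring = prompt_lower[start:end]
--             idx = content_lower.find(substring)
--             if idx != -1 and len(substring) > longest_length:
--                 longest_start = idx
--                 longest_length = len(substring)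
--                 break
--
--     if longest_start == -1:
--         return content
--
--     return (
--         content[:longest_start]
--         + "[REDACTED]"
--         + content[longest_start + longest_length :]
--     )
-- ===== SOURCE B (Python) =====
-- def _redact_leaked_content(content: str, system_prompt: str) -> str:
--     """Replace the longest leaked substring with [REDACTED]."""
--     content_lower = content.lower()
--     prompt_lower = system_prompt.lower()
--     n = len(prompt_lower)
--     for length in range(n, 20, -1):
--         for start in range(n - length + 1):
--             idx = content_lower.find(prompt_lower[start:start + length])
--             if idx != -1:
--                 return content[:idx] + "[REDACTED]" + content[idx + length:]
--     return content
-- ===== Notes on version B (the rewrite author's own statement) =====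
-- stated objective: simpler
-- what changed: Replaces A's start-major scan with a mutable best-(start,length) accumulator and per-start descending inner scan with a stateless length-major search (lengths descending, starts ascending) that returns the redaction at the first match found.
import Mathlib
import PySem

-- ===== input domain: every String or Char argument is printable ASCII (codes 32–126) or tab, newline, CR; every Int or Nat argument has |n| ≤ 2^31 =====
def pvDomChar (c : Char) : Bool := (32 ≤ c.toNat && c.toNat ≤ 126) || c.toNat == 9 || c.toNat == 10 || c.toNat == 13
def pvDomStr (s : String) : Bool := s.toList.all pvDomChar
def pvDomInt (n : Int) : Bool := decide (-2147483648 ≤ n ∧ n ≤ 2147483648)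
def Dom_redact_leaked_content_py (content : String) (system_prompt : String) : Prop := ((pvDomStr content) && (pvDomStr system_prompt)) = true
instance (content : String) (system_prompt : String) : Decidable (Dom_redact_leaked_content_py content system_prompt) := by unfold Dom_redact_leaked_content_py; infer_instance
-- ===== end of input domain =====

-- B replaces A's best-tracking start-major scan by a stateless length-major search with an
-- early return at the first match (objective: simpler); return values proved identical.

-- ===== PORT A =====
-- inner 'for end in range(len(prompt_lower), start + 20, -1)' loop, with its break
def pvInnerA (content_lower prompt_lower : List Char) (start : Int) (st : Int × Int) :
    List Int → Int × Int
  | [] => st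
  | e :: rest =>
      let substring := PySem.List.slice prompt_lower (some start) (some e)
      let idx := PySem.Chars.find content_lower substring
      if idx ≠ -1 ∧ (substring.length : Int) > st.2 then (idx, (substring.length : Int))
      else pvInnerA content_lower prompt_lower start st rest

def redact_leaked_content_py (content : String) (system_prompt : String) : String :=
  let content_lower := PySem.Chars.lower content.toList
  let prompt_lower := PySem.Chars.lower system_prompt.toList
  let res := (PySem.List.pyRange 0 (prompt_lower.length : Int) 1).foldl
      (fun st start =>
        pvInnerA content_lower prompt_lower start st
          (PySem.List.pyRange (prompt_lower.length : Int) (start + 20) (-1))) (-1, 0)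
  if res.1 = -1 then content
  else
    String.ofList (PySem.List.slice content.toList none (some res.1) ++ "[REDACTED]".toList
      ++ PySem.List.slice content.toList (some (res.1 + res.2)) none)

-- ===== PORT B =====
-- inner 'for start in range(n - length + 1)' loop with its early return
def pvAltInner (c content_lower prompt_lower : List Char) (length_ : Int) :
    List Int → Option String
  | [] => none
  | start :: rest =>
      let idx := PySem.Chars.find content_lower
        (PySem.List.slice prompt_lower (some start) (some (start + length_)))
      if idx ≠ -1 then
        some (String.ofList (PySem.List.slice c none (some idx) ++ "[REDACTED]".toList
          ++ PySem.List.slice c (some (idx + length_)) none))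
      else pvAltInner c content_lower prompt_lower length_ rest

-- outer 'for length in range(n, 20, -1)' loop
def pvAltOuter (c content_lower prompt_lower : List Char) : List Int → Option String
  | [] => none
  | length_ :: rest =>
      match pvAltInner c content_lower prompt_lower length_
          (PySem.List.pyRange 0 ((prompt_lower.length : Int) - length_ + 1) 1) with
      | some r => some r
      | none => pvAltOuter c content_lower prompt_lower rest

def redact_leaked_content_py_alt (content : String) (system_prompt : String) : String :=
  let content_lower := PySem.Chars.lower content.toList
  let prompt_lower := PySem.Chars.lower system_prompt.toList
  match pvAltOuter content.toList content_lower prompt_lower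
      (PySem.List.pyRange (prompt_lower.length : Int) 20 (-1)) with
  | some r => r
  | none => content

-- ===== PRECONDITION & SPEC =====
def Spec_redact_leaked_content_py (content : String) (system_prompt : String) (out : String) : Prop := out = redact_leaked_content_py_alt content system_prompt
instance (content : String) (system_prompt : String) (out : String) : Decidable (Spec_redact_leaked_content_py content system_prompt out) := by unfold Spec_redact_leaked_content_py; infer_instance

-- ===== CLAIM (what is proved, stated in full; the proofs are below) =====
def Claim_equal_redact_leaked_content_py : Prop := ∀ (content : String) (system_prompt : String), Dom_redact_leaked_content_py content system_prompt → Spec_redact_leaked_content_py content system_prompt (redact_leaked_content_py content system_prompt)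

-- ===== LEMMAS AND PROOFS =====
-- helper: the redacted output string, as built by both ports
def pvRedact (c : List Char) (idx L : Int) : String :=
  String.ofList (PySem.List.slice c none (some idx) ++ "[REDACTED]".toList
    ++ PySem.List.slice c (some (idx + L)) none)

-- find of the lowered prompt slice [t:e] in the lowered content
def pvF (cl pl : List Char) (t e : Int) : Int :=
  PySem.Chars.find cl (PySem.List.slice pl (some t) (some e))

lemma pvPyRange_down (a b : Int) :
    PySem.List.pyRange a b (-1) = (List.range (a - b).toNat).map (fun k : Nat => a - (k : Int)) := by
  simp only [PySem.List.pyRange]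
  norm_num
  rcases lt_or_ge b a with h | h
  · rw [if_pos h]
    apply List.map_congr_left
    intro k _
    ring
  · rw [if_neg (by omega)]
    have h0 : (a - b).toNat = 0 := by omega
    simp [h0]

lemma pvMem_down {a b x : Int} :
    x ∈ PySem.List.pyRange a b (-1) ↔ b < x ∧ x ≤ a := by
  rw [pvPyRange_down]
  simp only [List.mem_map, List.mem_range]
  constructor
  · rintro ⟨k, hk, rfl⟩; omega
  · rintro ⟨h1, h2⟩; exact ⟨(a - x).toNat, by omega, by omega⟩

lemma pvPairwise_down (a b : Int) :
    (PySem.List.pyRange a b (-1)).Pairwise (· > ·) := by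
  rw [pvPyRange_down]
  exact List.pairwise_map.mpr (List.pairwise_lt_range.imp (fun {x y} h => by omega))

lemma pvPyRange_up (a b : Int) :
    PySem.List.pyRange a b 1 = (List.range (b - a).toNat).map (fun k : Nat => a + (k : Int)) := by
  rw [PySem.List.pyRange_of_pos a b one_pos]
  norm_num
  rcases lt_or_ge a b with h | h
  · rw [if_pos h]
  · rw [if_neg (by omega)]
    have h0 : (b - a).toNat = 0 := by omega
    simp [h0]

lemma pvMem_up {a b x : Int} :
    x ∈ PySem.List.pyRange a b 1 ↔ a ≤ x ∧ x < b := by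
  rw [pvPyRange_up]
  simp only [List.mem_map, List.mem_range]
  constructor
  · rintro ⟨k, hk, rfl⟩; omega
  · rintro ⟨h1, h2⟩; exact ⟨(x - a).toNat, by omega, by omega⟩

lemma pvPairwise_up (a b : Int) :
    (PySem.List.pyRange a b 1).Pairwise (· < ·) := by
  rw [pvPyRange_up]
  exact List.pairwise_map.mpr (List.pairwise_lt_range.imp (fun {x y} h => by omega))

lemma pvSlice_len (pl : List Char) {t e : Int} (h0 : 0 ≤ t) (hte : t ≤ e)
    (hen : e ≤ (pl.length : Int)) :
    ((PySem.List.slice pl (some t) (some e)).length : Int) = e - t := by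
  rw [PySem.List.slice_of_nonneg pl h0 (by omega) (by omega) hen]
  simp only [List.length_take, List.length_drop]
  omega
lemma pvInnerA_stay (cl pl : List Char) (t : Int) (st : Int × Int) (ends : List Int)
    (hb : ∀ e ∈ ends, 0 ≤ t ∧ t ≤ e ∧ e ≤ (pl.length : Int))
    (hle : ∀ e ∈ ends, e - t ≤ st.2) :
    pvInnerA cl pl t st ends = st := by
  induction ends with
  | nil => rfl
  | cons e rest ih =>
      obtain ⟨h0, hte, hen⟩ := hb e (List.mem_cons_self)
      simp only [pvInnerA]
      rw [if_neg]
      · exact ih (fun e' he' => hb e' (List.mem_cons_of_mem _ he'))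
          (fun e' he' => hle e' (List.mem_cons_of_mem _ he'))
      · rintro ⟨-, h2⟩
        rw [pvSlice_len pl h0 hte hen] at h2
        exact absurd h2 (not_lt.mpr (hle e List.mem_cons_self))

lemma pvInnerA_spec (cl pl : List Char) (t : Int) (st : Int × Int) (ends : List Int)
    (hdesc : ends.Pairwise (· > ·))
    (hb : ∀ e ∈ ends, 0 ≤ t ∧ t < e ∧ e ≤ (pl.length : Int)) :
    ((∀ e ∈ ends, pvF cl pl t e = -1) ∧ pvInnerA cl pl t st ends = st)
    ∨ ∃ e ∈ ends, pvF cl pl t e ≠ -1 ∧ (∀ e' ∈ ends, pvF cl pl t e' ≠ -1 → e' ≤ e) ∧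
        pvInnerA cl pl t st ends = if e - t > st.2 then (pvF cl pl t e, e - t) else st := by
  induction ends with
  | nil => exact Or.inl ⟨by simp, rfl⟩
  | cons e rest ih =>
      obtain ⟨h0, hte, hen⟩ := hb e (List.mem_cons_self)
      have hlen : ((PySem.List.slice pl (some t) (some e)).length : Int) = e - t :=
        pvSlice_len pl h0 (le_of_lt hte) hen
      have hgt : ∀ e' ∈ rest, e' < e := fun e' he' => List.rel_of_pairwise_cons hdesc he'
      by_cases hF : pvF cl pl t e = -1
      · -- not found at e: the step does not fire, recurse
        have hstep : pvInnerA cl pl t st (e :: rest) = pvInnerA cl pl t st rest := by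
          simp only [pvInnerA]
          rw [if_neg]
          rintro ⟨h1, -⟩
          exact h1 hF
        rcases ih (List.Pairwise.of_cons hdesc)
            (fun e' he' => hb e' (List.mem_cons_of_mem _ he')) with ⟨hn, heq⟩ | ⟨e', he', hF', hmax, heq⟩
        · refine Or.inl ⟨?_, by rw [hstep, heq]⟩
          intro e'' he''
          rcases List.mem_cons.mp he'' with rfl | h
          · exact hF
          · exact hn e'' h
        · refine Or.inr ⟨e', List.mem_cons_of_mem _ he', hF', ?_, by rw [hstep, heq]⟩
          intro e'' he'' hne
          rcases List.mem_cons.mp he'' with rfl | h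
          · exact absurd hF (by exact hne)
          · exact hmax e'' h hne
      · -- found at e: e is the first (hence largest) found end
        refine Or.inr ⟨e, List.mem_cons_self, hF, ?_, ?_⟩
        · intro e'' he'' _
          rcases List.mem_cons.mp he'' with rfl | h
          · exact le_refl _
          · exact le_of_lt (hgt e'' h)
        · by_cases hc : e - t > st.2
          · rw [if_pos hc]
            simp only [pvInnerA]
            rw [if_pos ⟨hF, by rw [hlen]; exact hc⟩, hlen]
            rfl
          · rw [if_neg hc]
            simp only [pvInnerA]
            rw [if_neg (by rintro ⟨-, h2⟩; rw [hlen] at h2; exact hc h2)]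
            exact pvInnerA_stay cl pl t st rest
              (fun e' he' => by have := hb e' (List.mem_cons_of_mem _ he'); exact ⟨this.1, le_of_lt this.2.1, this.2.2⟩)
              (fun e' he' => by have := hgt e' he'; omega)
-- Invariant of A's outer fold after the starts 0..m-1 have been processed:
-- either nothing admissible was found, or the state holds the first content index and
-- the length of the longest found prompt substring, earliest prompt start first.
def pvPS (cl pl : List Char) (m : Nat) (r : Int × Int) : Prop :=
  (r = (-1, 0) ∧ ∀ t L : Int, 0 ≤ t → t < (m : Int) → 21 ≤ L → t + L ≤ (pl.length : Int) →
      pvF cl pl t (t + L) = -1)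
  ∨ (∃ t L : Int, 0 ≤ t ∧ t < (m : Int) ∧ 21 ≤ L ∧ t + L ≤ (pl.length : Int) ∧
      pvF cl pl t (t + L) ≠ -1 ∧ r = (pvF cl pl t (t + L), L) ∧
      (∀ t' L' : Int, 0 ≤ t' → t' < (m : Int) → 21 ≤ L' → t' + L' ≤ (pl.length : Int) →
        pvF cl pl t' (t' + L') ≠ -1 → L' ≤ L) ∧
      (∀ t' : Int, 0 ≤ t' → t' < t → pvF cl pl t' (t' + L) = -1))

lemma pvStep (cl pl : List Char) (m : Nat) (r : Int × Int) (h : pvPS cl pl m r) :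
    pvPS cl pl (m + 1)
      (pvInnerA cl pl (m : Int) r
        (PySem.List.pyRange ((pl.length : Int)) ((m : Int) + 20) (-1))) := by
  have hb : ∀ e ∈ PySem.List.pyRange ((pl.length : Int)) ((m : Int) + 20) (-1),
      0 ≤ (m : Int) ∧ (m : Int) < e ∧ e ≤ (pl.length : Int) := by
    intro e he
    have := pvMem_down.mp he
    omega
  rcases pvInnerA_spec cl pl (m : Int) r _ (pvPairwise_down _ _) hb with
    ⟨hnone, heq⟩ | ⟨e, he, hF, hmax, heq⟩
  · -- no admissible end found for start m
    rw [heq]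
    rcases h with ⟨hr, hn⟩ | ⟨t, L, ht0, htm, hL, htL, htF, hreq, hA, hB⟩
    · left
      refine ⟨hr, fun t L ht0 htm hL htL => ?_⟩
      rcases lt_or_ge t (m : Int) with h' | h'
      · exact hn t L ht0 h' hL htL
      · have hte : t = (m : Int) := by omega
        subst hte
        by_contra hc
        exact hc (hnone ((m : Int) + L) (pvMem_down.mpr (by omega)))
    · right
      refine ⟨t, L, ht0, by omega, hL, htL, htF, hreq, ?_, hB⟩
      intro t' L' ht0' htm' hL' htL' hF'
      rcases lt_or_ge t' (m : Int) with h' | h'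
      · exact hA t' L' ht0' h' hL' htL' hF'
      · have : t' = (m : Int) := by omega
        subst this
        exact absurd (hnone ((m : Int) + L') (pvMem_down.mpr (by omega))) hF'
  · -- largest admissible end e found for start m
    have heb := pvMem_down.mp he
    rcases h with ⟨hr, hn⟩ | ⟨t, L, ht0, htm, hL, htL, htF, hreq, hA, hB⟩
    · -- previous state empty: state moves to (find, e - m)
      rw [heq, if_pos (by rw [hr]; simp; omega)]
      right
      have hme : (m : Int) + (e - (m : Int)) = e := by ring
      refine ⟨(m : Int), e - (m : Int), by omega, by omega, by omega, by omega,
        by rw [hme]; exact hF, by rw [hme], ?_, ?_⟩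
      · intro t' L' ht0' htm' hL' htL' hF'
        rcases lt_or_ge t' (m : Int) with h' | h'
        · exact absurd (hn t' L' ht0' h' hL' htL') hF'
        · have : t' = (m : Int) := by omega
          subst this
          have := hmax ((m : Int) + L') (pvMem_down.mpr (by omega)) hF'
          omega
      · intro t' ht0' ht'
        exact hn t' (e - (m : Int)) ht0' (by omega) (by omega) (by omega)
    · have hr2 : r.2 = L := by rw [hreq]
      by_cases hc : e - (m : Int) > L
      · -- strictly longer match at start m: state updates
        rw [heq, if_pos (by rw [hr2]; exact hc)]
        right
        have hme : (m : Int) + (e - (m : Int)) = e := by ring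
        refine ⟨(m : Int), e - (m : Int), by omega, by omega, by omega, by omega,
          by rw [hme]; exact hF, by rw [hme], ?_, ?_⟩
        · intro t' L' ht0' htm' hL' htL' hF'
          rcases lt_or_ge t' (m : Int) with h' | h'
          · have := hA t' L' ht0' h' hL' htL' hF'
            omega
          · have : t' = (m : Int) := by omega
            subst this
            have := hmax ((m : Int) + L') (pvMem_down.mpr (by omega)) hF'
            omega
        · intro t' ht0' ht'
          by_contra hcon
          have := hA t' (e - (m : Int)) ht0' (by omega) (by omega) (by omega) hcon
          omega
      · -- no improvement: state kept
        rw [heq, if_neg (by rw [hr2]; exact hc)]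
        right
        refine ⟨t, L, ht0, by omega, hL, htL, htF, hreq, ?_, hB⟩
        intro t' L' ht0' htm' hL' htL' hF'
        rcases lt_or_ge t' (m : Int) with h' | h'
        · exact hA t' L' ht0' h' hL' htL' hF'
        · have : t' = (m : Int) := by omega
          subst this
          have := hmax ((m : Int) + L') (pvMem_down.mpr (by omega)) hF'
          omega

lemma pvFoldA (cl pl : List Char) (m : Nat) :
    pvPS cl pl m (((List.range m).map (fun k : Nat => (k : Int))).foldl
      (fun st start =>
        pvInnerA cl pl start st
          (PySem.List.pyRange ((pl.length : Int)) (start + 20) (-1))) (-1, 0)) := by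
  induction m with
  | zero => exact Or.inl ⟨rfl, fun t L h1 h2 => by omega⟩
  | succ m ih =>
      rw [List.range_succ, List.map_append, List.foldl_append]
      exact pvStep cl pl m _ ih
lemma pvAltInner_none_iff (c cl pl : List Char) (L : Int) (starts : List Int) :
    pvAltInner c cl pl L starts = none ↔ ∀ t ∈ starts, pvF cl pl t (t + L) = -1 := by
  induction starts with
  | nil => simp [pvAltInner]
  | cons s rest ih =>
      simp only [pvAltInner]
      by_cases h : PySem.Chars.find cl (PySem.List.slice pl (some s) (some (s + L))) = -1
      · rw [if_neg (by intro hc; exact hc h)]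
        rw [ih]
        constructor
        · intro hall t ht
          rcases List.mem_cons.mp ht with rfl | ht'
          · exact h
          · exact hall t ht'
        · intro hall t ht
          exact hall t (List.mem_cons_of_mem _ ht)
      · rw [if_pos h]
        simp only [reduceCtorEq, false_iff]
        intro hall
        exact h (hall s List.mem_cons_self)

lemma pvAltInner_some (c cl pl : List Char) (L : Int) (starts : List Int) (s : String)
    (hasc : starts.Pairwise (· < ·))
    (h : pvAltInner c cl pl L starts = some s) :
    ∃ t ∈ starts, pvF cl pl t (t + L) ≠ -1 ∧ s = pvRedact c (pvF cl pl t (t + L)) L ∧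
      ∀ t' ∈ starts, t' < t → pvF cl pl t' (t' + L) = -1 := by
  induction starts with
  | nil => simp [pvAltInner] at h
  | cons a rest ih =>
      simp only [pvAltInner] at h
      by_cases hF : PySem.Chars.find cl (PySem.List.slice pl (some a) (some (a + L))) = -1
      · rw [if_neg (by intro hc; exact hc hF)] at h
        obtain ⟨t, ht, htF, hs, hmin⟩ := ih (List.Pairwise.of_cons hasc) h
        refine ⟨t, List.mem_cons_of_mem _ ht, htF, hs, ?_⟩
        intro t' ht' hlt
        rcases List.mem_cons.mp ht' with rfl | h'
        · exact hF
        · exact hmin t' h' hlt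
      · rw [if_pos hF] at h
        refine ⟨a, List.mem_cons_self, hF, by injection h with h'; rw [← h']; rfl, ?_⟩
        intro t' ht' hlt
        rcases List.mem_cons.mp ht' with rfl | h'
        · omega
        · exact absurd hlt (by have := List.rel_of_pairwise_cons hasc h'; omega)

lemma pvAltOuter_none_iff (c cl pl : List Char) (Ls : List Int) :
    pvAltOuter c cl pl Ls = none ↔
      ∀ L ∈ Ls, ∀ t ∈ PySem.List.pyRange 0 ((pl.length : Int) - L + 1) 1,
        pvF cl pl t (t + L) = -1 := by
  induction Ls with
  | nil => simp [pvAltOuter]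
  | cons L rest ih =>
      simp only [pvAltOuter]
      cases hI : pvAltInner c cl pl L
          (PySem.List.pyRange 0 ((pl.length : Int) - L + 1) 1) with
      | some r =>
          show some r = none ↔ _
          simp only [reduceCtorEq, false_iff]
          intro hall
          have hnone : pvAltInner c cl pl L
              (PySem.List.pyRange 0 ((pl.length : Int) - L + 1) 1) = none :=
            (pvAltInner_none_iff c cl pl L _).mpr
              (fun t ht => hall L List.mem_cons_self t ht)
          simp at hnone hI
          exact absurd hI (by rw [hnone]; simp)
      | none =>
          rw [ih]
          constructor
          · intro hall L' hL' t ht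
            rcases List.mem_cons.mp hL' with rfl | h'
            · exact (pvAltInner_none_iff c cl pl L' _).mp hI t ht
            · exact hall L' h' t ht
          · intro hall L' hL' t ht
            exact hall L' (List.mem_cons_of_mem _ hL') t ht

lemma pvAltOuter_some (c cl pl : List Char) (Ls : List Int) (s : String)
    (hdesc : Ls.Pairwise (· > ·))
    (h : pvAltOuter c cl pl Ls = some s) :
    ∃ L ∈ Ls, ∃ t ∈ PySem.List.pyRange 0 ((pl.length : Int) - L + 1) 1,
      pvF cl pl t (t + L) ≠ -1 ∧ s = pvRedact c (pvF cl pl t (t + L)) L ∧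
      (∀ L' ∈ Ls, L < L' → ∀ t' ∈ PySem.List.pyRange 0 ((pl.length : Int) - L' + 1) 1,
        pvF cl pl t' (t' + L') = -1) ∧
      (∀ t' ∈ PySem.List.pyRange 0 ((pl.length : Int) - L + 1) 1, t' < t →
        pvF cl pl t' (t' + L) = -1) := by
  induction Ls with
  | nil => simp [pvAltOuter] at h
  | cons L rest ih =>
      simp only [pvAltOuter] at h
      cases hI : pvAltInner c cl pl L
          (PySem.List.pyRange 0 ((pl.length : Int) - L + 1) 1) with
      | some r =>
          rw [hI] at h
          obtain ⟨t, ht, htF, hs, hmin⟩ :=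
            pvAltInner_some c cl pl L _ r (pvPairwise_up _ _) hI
          refine ⟨L, List.mem_cons_self, t, ht, htF, by injection h with h'; rw [← h']; exact hs, ?_, hmin⟩
          intro L' hL' hlt t' ht'
          rcases List.mem_cons.mp hL' with rfl | h'
          · omega
          · exact absurd hlt (by have := List.rel_of_pairwise_cons hdesc h'; omega)
      | none =>
          rw [hI] at h
          obtain ⟨L0, hL0, t0, ht0, hF0, hs0, hmax0, hmin0⟩ :=
            ih (List.Pairwise.of_cons hdesc) h
          refine ⟨L0, List.mem_cons_of_mem _ hL0, t0, ht0, hF0, hs0, ?_, hmin0⟩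
          intro L' hL' hlt t' ht'
          rcases List.mem_cons.mp hL' with rfl | h'
          · exact (pvAltInner_none_iff c cl pl L' _).mp hI t' ht'
          · exact hmax0 L' h' hlt t' ht'
lemma pvMain (content system_prompt : String) :
    redact_leaked_content_py content system_prompt
      = redact_leaked_content_py_alt content system_prompt := by
  unfold redact_leaked_content_py redact_leaked_content_py_alt
  set c := content.toList with hc
  set cl := PySem.Chars.lower content.toList with hcl
  set pl := PySem.Chars.lower system_prompt.toList with hpl
  dsimp only
  rw [PySem.List.pyRange_zero_natCast pl.length]
  have hA := pvFoldA cl pl pl.length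
  rcases hA with ⟨hr, hn⟩ | ⟨t, L, ht0, htm, hL, htL, htF, hreq, hAmax, hAmin⟩
  · rw [hr]
    have hBnone : pvAltOuter c cl pl
        (PySem.List.pyRange ((pl.length : Int)) 20 (-1)) = none := by
      rw [pvAltOuter_none_iff]
      intro L hLm t htm
      have h1 := pvMem_down.mp hLm
      have h2 := pvMem_up.mp htm
      exact hn t L (by omega) (by omega) (by omega) (by omega)
    rw [hBnone]
    rfl
  · rw [hreq]
    simp only
    rw [if_neg htF]
    cases hB : pvAltOuter c cl pl (PySem.List.pyRange ((pl.length : Int)) 20 (-1)) with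
    | none =>
        exfalso
        have := (pvAltOuter_none_iff c cl pl _).mp hB L
          (pvMem_down.mpr ⟨by omega, by omega⟩) t (pvMem_up.mpr ⟨by omega, by omega⟩)
        exact htF this
    | some s =>
        obtain ⟨L', hL'm, t', ht'm, hF', hs, hmax', hmin'⟩ :=
          pvAltOuter_some c cl pl _ s (pvPairwise_down _ _) hB
        have hL'b := pvMem_down.mp hL'm
        have ht'b := pvMem_up.mp ht'm
        have hle1 : L' ≤ L := hAmax t' L' (by omega) (by omega) (by omega) (by omega) hF'
        have hle2 : L ≤ L' := by
          by_contra hcon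
          exact htF (hmax' L (pvMem_down.mpr ⟨by omega, by omega⟩) (by omega)
            t (pvMem_up.mpr ⟨by omega, by omega⟩))
        have hLL : L' = L := by omega
        rw [hLL] at hF' hs
        have hne1 : ¬ t' < t := fun hlt => hF' (hAmin t' (by omega) hlt)
        have hne2 : ¬ t < t' := fun hlt => htF (hLL ▸ hmin' t
          (pvMem_up.mpr ⟨by omega, by omega⟩) hlt)
        have htt : t' = t := by omega
        rw [htt] at hs
        rw [hs]
        rfl

-- ===== VERDICT (by name: the statement is the Claim_ definition above) =====
theorem redact_leaked_content_py_spec : Claim_equal_redact_leaked_content_py := by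
  intro content system_prompt _
  exact pvMain content system_prompt
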